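-- pv_equiv track=rewrite | github.com/seb5666/2048RL | game.py | colapse_row
-- ===== SOURCE A (Python) =====
-- def colapse_row(row):
--     i = 0
--     j = 0
--     while i < len(row):
--         if row[i] != 0:
--             row[j] = row[i]
--             j+=1
--         i+=1
--     for k in range(j, len(row)):
--         row[k] = 0
--     for k in range(min(j, len(row)-1)):
--         if row[k] == row[k+1]:
--             row[k] = 2 * row[k]
--             for l in range(k+1, min(j, len(row) - 1)):
--                 row[l] = row[l+1]
--             row[min(j, len(row)-1)] = 0
--             k += 1
--     return row
-- ===== SOURCE B (Python) =====
-- # Single left-to-right pass: gather nonzero tiles, merge adjacent equal pairs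
-- # once each, pad with zeros. O(n) instead of A's shift-per-merge O(n^2).
-- # Like A, mutates row in place (row[:] = out) and returns it.
-- def colapse_row(row):
--     tiles = [x for x in row if x != 0]
--     out = []
--     i = 0
--     while i < len(tiles):
--         if i + 1 < len(tiles) and tiles[i] == tiles[i + 1]:
--             out.append(2 * tiles[i])
--             i += 2
--         else:
--             out.append(tiles[i])
--             i += 1
--     out.extend([0] * (len(row) - len(out)))
--     row[:] = out
--     return row
-- ===== Notes on version B (the rewrite author's own statement) =====
-- stated objective: faster
-- what changed: Replaces A's in-place index juggling (compaction pass plus a merge loop that shifts the whole tail left after every merge) by one left-to-right pass over the nonzero tiles that emits each tile or merged pair once and pads with zeros.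
import Mathlib
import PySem

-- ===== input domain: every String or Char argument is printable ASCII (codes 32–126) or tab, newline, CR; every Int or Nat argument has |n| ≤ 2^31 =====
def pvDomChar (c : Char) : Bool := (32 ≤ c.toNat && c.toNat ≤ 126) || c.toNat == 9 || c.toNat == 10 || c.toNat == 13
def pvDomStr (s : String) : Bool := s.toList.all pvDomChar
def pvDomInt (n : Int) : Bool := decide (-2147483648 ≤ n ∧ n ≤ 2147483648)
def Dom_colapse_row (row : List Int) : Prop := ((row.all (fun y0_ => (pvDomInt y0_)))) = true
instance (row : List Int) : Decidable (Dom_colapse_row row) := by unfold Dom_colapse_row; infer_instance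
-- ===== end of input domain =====

-- B replaces A's in-place compaction + shift-per-merge loops by one O(n) pass over the
-- nonzero tiles; equivalence is about the returned list (both Pythons also mutate `row`
-- in place to that same list).

-- ===== PORT A =====
-- A's `while i < len(row)` compaction loop; all Python reads row[i]/writes row[j] are at
-- provably in-range nonnegative indices, so row[i] is ported as getD _ 0 and row[j]=v as set.
def pvPhase1 (s : List Int) (i j : Nat) : List Int × Nat :=
  if _h : i < s.length then
    if s.getD i 0 ≠ 0 then pvPhase1 (s.set j (s.getD i 0)) (i + 1) (j + 1)
    else pvPhase1 s (i + 1) j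
  else (s, j)
termination_by s.length - i
decreasing_by all_goals (try simp only [List.length_set]); omega

-- A's `for k in range(j, len(row)): row[k] = 0`
def pvPhase2 (s : List Int) (k n : Nat) : List Int :=
  if k < n then pvPhase2 (s.set k 0) (k + 1) n else s
termination_by n - k

-- A's inner `for l in range(k+1, min(j, len(row)-1)): row[l] = row[l+1]`
def pvShift (s : List Int) (l m : Nat) : List Int :=
  if l < m then pvShift (s.set l (s.getD (l + 1) 0)) (l + 1) m else s
termination_by m - l

-- A's `for k in range(min(j, len(row)-1))` merge loop. The `k += 1` in its body has no
-- effect in Python (the for-statement resets k), so it is not ported.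
def pvPhase3 (s : List Int) (k m : Nat) : List Int :=
  if k < m then
    pvPhase3
      (if s.getD k 0 = s.getD (k + 1) 0 then
        (pvShift (s.set k (2 * s.getD k 0)) (k + 1) m).set m 0
      else s) (k + 1) m
  else s
termination_by m - k

-- Python computes min(j, len(row)-1); for row = [] that is min(0,-1) = -1 and range(-1)
-- is empty, exactly like the Nat value min 0 (0-1) = 0 here (j = 0 forces an empty loop).
def colapse_row (row : List Int) : List Int :=
  let p := pvPhase1 row 0 0
  let s := pvPhase2 p.1 p.2 row.length
  pvPhase3 s 0 (min p.2 (row.length - 1))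

-- ===== PORT B =====
-- Source B's `while i < len(tiles)` pass, consuming one tile (or a merged pair) per step.
def pvMergeTiles : List Int → List Int
  | [] => []
  | [x] => [x]
  | x :: y :: t => if x = y then 2 * x :: pvMergeTiles t else x :: pvMergeTiles (y :: t)

def colapse_row_alt (row : List Int) : List Int :=
  let tiles := row.filter (fun x => x != 0)
  let out := pvMergeTiles tiles
  out ++ List.replicate (row.length - out.length) 0

-- ===== PRECONDITION & SPEC =====
def Spec_colapse_row (row : List Int) (out : List Int) : Prop := out = colapse_row_alt row
instance (row : List Int) (out : List Int) : Decidable (Spec_colapse_row row out) := by unfold Spec_colapse_row; infer_instance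

-- ===== CLAIM (what is proved, stated in full; the proofs are below) =====
def Claim_equal_colapse_row : Prop := ∀ (row : List Int), Dom_colapse_row row → Spec_colapse_row row (colapse_row row)

-- ===== LEMMAS AND PROOFS =====

lemma length_pvMergeTiles (l : List Int) : (pvMergeTiles l).length ≤ l.length := by
  induction l using pvMergeTiles.induct with
  | case1 => simp [pvMergeTiles]
  | case2 => simp [pvMergeTiles]
  | case3 y t ih => simp only [pvMergeTiles, if_true, List.length_cons]; simp at ih ⊢; omega
  | case4 x y t hxy ih => simp only [pvMergeTiles, if_neg hxy, List.length_cons]; simp at ih ⊢; omega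

lemma set_zero_replicate (z i : Nat) : (List.replicate z (0 : Int)).set i 0 = List.replicate z 0 := by
  induction z generalizing i with
  | zero => simp
  | succ n ih =>
    cases i with
    | zero => simp [List.replicate_succ]
    | succ i => simp [List.replicate_succ, ih]

-- phase 1: the first j_out entries are the nonzeros of the tail, length is preserved
lemma pvPhase1_spec (s : List Int) (i j : Nat) (hj : j ≤ i) :
    (pvPhase1 s i j).2 = j + ((s.drop i).filter (fun x => x != 0)).length ∧
    (pvPhase1 s i j).1.length = s.length ∧
    (pvPhase1 s i j).1.take (pvPhase1 s i j).2
      = s.take j ++ (s.drop i).filter (fun x => x != 0) := by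
  induction s, i, j using pvPhase1.induct with
  | case1 s i j hi hne ih =>
    have hji : j < s.length := by omega
    have hdrop : s.drop i = s.getD i 0 :: s.drop (i + 1) := by
      rw [List.getD_eq_getElem _ _ hi]; exact List.drop_eq_getElem_cons hi
    have hdrop' : (s.set j (s.getD i 0)).drop (i + 1) = s.drop (i + 1) := by
      rw [List.drop_set, if_pos (by omega)]
    have hfilter : (s.drop i).filter (fun x => x != 0)
        = s.getD i 0 :: (s.drop (i + 1)).filter (fun x => x != 0) := by
      rw [hdrop, List.filter_cons, if_pos (by simpa using hne)]
    have htake : (s.set j (s.getD i 0)).take (j + 1) = s.take j ++ [s.getD i 0] := by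
      rw [List.set_eq_take_cons_drop _ hji, List.take_append]
      simp [List.length_take, Nat.min_eq_left (le_of_lt hji)]
    obtain ⟨ih1, ih2, ih3⟩ := ih (by omega)
    rw [pvPhase1, dif_pos hi, if_pos hne]
    refine ⟨?_, ?_, ?_⟩
    · rw [ih1, hdrop', hfilter]; simp; omega
    · rw [ih2]; simp
    · rw [ih3, hdrop', htake, hfilter]; simp
  | case2 s i j hi hz ih =>
    have hdrop : s.drop i = s.getD i 0 :: s.drop (i + 1) := by
      rw [List.getD_eq_getElem _ _ hi]; exact List.drop_eq_getElem_cons hi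
    have hfilter : (s.drop i).filter (fun x => x != 0)
        = (s.drop (i + 1)).filter (fun x => x != 0) := by
      rw [hdrop, List.filter_cons, if_neg (by simpa using hz)]
    obtain ⟨ih1, ih2, ih3⟩ := ih (by omega)
    rw [pvPhase1, dif_pos hi, if_neg hz]
    exact ⟨by rw [ih1, hfilter], ih2, by rw [ih3, hfilter]⟩
  | case3 s i j hi =>
    rw [pvPhase1, dif_neg hi]
    simp [List.drop_eq_nil_of_le (by omega : s.length ≤ i)]

lemma pvPhase2_spec (s : List Int) (k n : Nat) (hn : n = s.length) :
    pvPhase2 s k n = s.take k ++ List.replicate (n - k) 0 := by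
  induction s, k using pvPhase2.induct n with
  | case1 s k hk ih =>
    rw [pvPhase2, if_pos hk]
    rw [ih (by simp [hn])]
    have h1 : (s.set k 0).take (k + 1) = s.take k ++ [0] := by
      rw [List.set_eq_take_cons_drop 0 (by omega)]
      rw [List.take_append]
      simp [List.length_take, Nat.min_eq_left (by omega : k ≤ s.length)]
    rw [h1]
    have h2 : n - k = (n - (k + 1)) + 1 := by omega
    rw [h2, List.replicate_succ]
    simp
  | case2 s k hk =>
    rw [pvPhase2, if_neg hk]
    have : n - k = 0 := by omega
    rw [this, List.take_of_length_le (by omega)]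
    simp

lemma pvShift_spec (q : Nat) : ∀ (u rest : List Int), q < rest.length →
    pvShift (u ++ rest) u.length (u.length + q)
      = u ++ rest.tail.take q ++ rest.drop q := by
  induction q with
  | zero =>
    intro u rest _
    rw [pvShift, if_neg (by omega)]
    simp
  | succ q ih =>
    intro u rest hq
    match rest, hq with
    | a :: b :: r', hq =>
      rw [pvShift, if_pos (by omega)]
      have hget : (u ++ a :: b :: r').getD (u.length + 1) 0 = b := by
        rw [List.getD_append_right _ _ _ _ (by omega)]
        simp
      have hset : (u ++ a :: b :: r').set u.length b = u ++ b :: b :: r' := by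
        rw [List.set_append, if_neg (by omega)]
        simp
      rw [hget, hset]
      have hre : u ++ b :: b :: r' = (u ++ [b]) ++ b :: r' := by simp
      have hlen : u.length + 1 = (u ++ [b]).length := by simp
      have hm : u.length + (q + 1) = (u ++ [b]).length + q := by simp; omega
      rw [hre, hlen, hm, ih (u ++ [b]) (b :: r') (by simp at hq ⊢; omega)]
      simp

lemma getD_decomp (d w : List Int) (k : Nat) (hk : k = d.length) :
    (d ++ w).getD k 0 = w.getD 0 0 ∧ (d ++ w).getD (k + 1) 0 = w.getD 1 0 := by
  constructor
  · rw [List.getD_append_right _ _ _ _ (by omega)]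
    simp [hk]
  · rw [List.getD_append_right _ _ _ _ (by omega)]
    simp [hk]

lemma set_at_append (u w : List Int) (p : Nat) (hp : p = u.length) (v : Int) :
    (u ++ w).set p v = u ++ w.set 0 v := by
  rw [List.set_append, if_neg (by omega), hp, Nat.sub_self]

lemma pvPhase3_spec (m : Nat) : ∀ (n k : Nat) (d r : List Int) (z : Nat),
    m - k ≤ n → k = d.length → (∀ x ∈ r, x ≠ 0) →
    k + r.length ≤ m + 1 →
    (1 ≤ z → k + r.length ≤ m) →
    m + 1 ≤ k + r.length + z →
    pvPhase3 (d ++ (r ++ List.replicate z 0)) k m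
      = d ++ pvMergeTiles r ++ List.replicate (z + r.length - (pvMergeTiles r).length) 0 := by
  intro n
  induction n with
  | zero =>
    intro k d r z hn hk hnz h3 h4 h5
    rw [pvPhase3, if_neg (by omega)]
    rcases r with _ | ⟨x, _ | ⟨y, t⟩⟩
    · simp [pvMergeTiles]
    · simp only [List.length_cons, List.length_nil] at h3 h4 h5
      have hz : z = 0 := by by_contra hzz; have := h4 (by omega); omega
      subst hz
      simp [pvMergeTiles]
    · exfalso
      simp only [List.length_cons] at h3 h4
      omega
  | succ n ihn =>
    intro k d r z hn hk hnz h3 h4 h5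
    by_cases hkm : k < m
    case neg =>
      rw [pvPhase3, if_neg hkm]
      rcases r with _ | ⟨x, _ | ⟨y, t⟩⟩
      · simp [pvMergeTiles]
      · simp only [List.length_cons, List.length_nil] at h3 h4 h5
        have hz : z = 0 := by by_contra hzz; have := h4 (by omega); omega
        subst hz
        simp [pvMergeTiles]
      · exfalso
        simp only [List.length_cons] at h3 h4
        omega
    case pos =>
      rw [pvPhase3, if_pos hkm]
      rcases r with _ | ⟨x, _ | ⟨y, t⟩⟩
      · -- positions k and k+1 both read 0; the "merge" rewrites only zeros
        simp only [List.length_nil] at h3 h4 h5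
        have hz2 : 2 ≤ z := by omega
        obtain ⟨hg1, hg2⟩ := getD_decomp d (([] : List Int) ++ List.replicate z 0) k hk
        simp only [List.nil_append] at hg1 hg2 ⊢
        rw [hg1, hg2, List.getD_replicate _ (by omega : 0 < z),
            List.getD_replicate _ (by omega : 1 < z), if_pos rfl]
        have hset : ((d ++ List.replicate z 0).set k (2 * 0)) = d ++ List.replicate z 0 := by
          rw [List.set_append, if_neg (by omega)]
          rw [show (2 : Int) * 0 = 0 by ring, set_zero_replicate]
        rw [hset]
        have hsplit : d ++ List.replicate z 0 = (d ++ [0]) ++ List.replicate (z - 1) 0 := by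
          rw [show z = (z - 1) + 1 by omega, List.replicate_succ]
          simp
        have hshift := pvShift_spec (m - k - 1) (d ++ [0]) (List.replicate (z - 1) 0)
          (by simp only [List.length_replicate]; omega)
        have hlen1 : (d ++ [0]).length = k + 1 := by simp [hk]
        rw [hlen1, show k + 1 + (m - k - 1) = m by omega] at hshift
        rw [hsplit, hshift]
        have hall : (d ++ [0]) ++ (List.replicate (z - 1) 0).tail.take (m - k - 1)
              ++ (List.replicate (z - 1) 0).drop (m - k - 1)
            = d ++ ([0] ++ List.replicate (z - 1) 0) := by
          simp only [List.tail_replicate, List.take_replicate, List.drop_replicate,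
            List.append_assoc, List.replicate_append_replicate]
          congr 2
          congr 1
          omega
        rw [hall]
        have hset2 : (d ++ ([0] ++ List.replicate (z - 1) 0)).set m 0
            = d ++ ([0] ++ List.replicate (z - 1) 0) := by
          rw [show ([0] ++ List.replicate (z - 1) 0 : List Int) = List.replicate z 0 by
                rw [show ([0] : List Int) = List.replicate 1 0 by simp,
                    List.replicate_append_replicate]; congr 1; omega]
          rw [List.set_append, if_neg (by omega), set_zero_replicate]
        rw [hset2]
        have := ihn (k + 1) (d ++ [0]) [] (z - 1) (by omega) (by simp [hk]) (by simp)
          (by simp only [List.length_nil]; omega) (by intro _; simp only [List.length_nil]; omega)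
          (by simp only [List.length_nil]; omega)
        simp only [List.nil_append] at this
        rw [show d ++ ([0] ++ List.replicate (z - 1) 0) = (d ++ [0]) ++ List.replicate (z - 1) 0 by simp]
        rw [this]
        simp only [pvMergeTiles, List.nil_append, List.append_assoc, List.length_nil]
        congr 1
        rw [show z - 1 + 0 - 0 = z - 1 by omega, show z + 0 - 0 = z by omega,
            show ([0] ++ List.replicate (z - 1) 0 : List Int) = List.replicate z 0 by
              rw [show ([0] : List Int) = List.replicate 1 0 by simp,
                  List.replicate_append_replicate]; congr 1; omega]
      · -- a single nonzero tile left; row[k+1] is 0 (or out of the replicate), no merge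
        have hx : x ≠ 0 := hnz x (by simp)
        simp only [List.length_cons, List.length_nil] at h3 h4 h5
        obtain ⟨hg1, hg2⟩ := getD_decomp d ([x] ++ List.replicate z 0) k hk
        simp only [List.cons_append, List.nil_append] at hg1 hg2 ⊢
        have hg2' : (x :: List.replicate z 0).getD 1 0 = 0 := by
          rw [List.getD_cons_succ]
          rcases Nat.eq_zero_or_pos z with hz | hz
          · subst hz; simp
          · exact List.getD_replicate _ hz
        rw [hg1, hg2, List.getD_cons_zero, hg2', if_neg hx]
        have := ihn (k + 1) (d ++ [x]) [] z (by omega) (by simp [hk]) (by simp)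
          (by simp only [List.length_nil]; omega) (by intro _; simp only [List.length_nil]; omega)
          (by simp only [List.length_nil]; omega)
        simp only [List.nil_append] at this
        rw [show d ++ x :: List.replicate z 0 = (d ++ [x]) ++ List.replicate z 0 by simp]
        rw [this]
        simp [pvMergeTiles]
      · -- two tiles to compare
        simp only [List.length_cons] at h3 h4 h5
        obtain ⟨hg1, hg2⟩ := getD_decomp d ((x :: y :: t) ++ List.replicate z 0) k hk
        simp only [List.cons_append] at hg1 hg2 ⊢
        rw [hg1, hg2, List.getD_cons_zero, List.getD_cons_succ, List.getD_cons_zero]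
        by_cases hxy : x = y
        case neg =>
          rw [if_neg hxy]
          have := ihn (k + 1) (d ++ [x]) (y :: t) z (by omega) (by simp [hk])
            (fun a ha => hnz a (by simp at ha ⊢; tauto))
            (by simp only [List.length_cons]; omega)
            (by intro hz; have := h4 hz; simp only [List.length_cons]; omega)
            (by simp only [List.length_cons]; omega)
          rw [show d ++ x :: y :: (t ++ List.replicate z 0)
                = (d ++ [x]) ++ ((y :: t) ++ List.replicate z 0) by simp]
          rw [this]
          have hmlen := length_pvMergeTiles (y :: t)
          simp only [List.length_cons] at hmlen
          simp only [pvMergeTiles, if_neg hxy, List.length_cons]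
          rw [show z + (t.length + 1 + 1) - ((pvMergeTiles (y :: t)).length + 1)
                = z + (t.length + 1) - (pvMergeTiles (y :: t)).length by omega]
          simp
        case pos =>
          subst hxy
          rw [if_pos rfl]
          -- merge: double row[k], shift the tail left up to index m, zero row[m]
          have hset : ((d ++ x :: x :: (t ++ List.replicate z 0)).set k (2 * x))
              = (d ++ [2 * x]) ++ (x :: (t ++ List.replicate z 0)) := by
            rw [List.set_append, if_neg (by omega)]
            simp [hk]
          have hq1 : m - k - 1 < (x :: (t ++ List.replicate z 0)).length := by
            simp only [List.length_cons, List.length_append, List.length_replicate]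
            omega
          have hshift := pvShift_spec (m - k - 1) (d ++ [2 * x]) (x :: (t ++ List.replicate z 0)) hq1
          have hlen1 : (d ++ [2 * x]).length = k + 1 := by simp [hk]
          rw [hlen1, show k + 1 + (m - k - 1) = m by omega] at hshift
          rw [show d ++ x :: x :: (t ++ List.replicate z 0)
                = d ++ (x :: x :: t ++ List.replicate z 0) by simp] at hset ⊢
          rw [hset, hshift]
          have hqt : t.length ≤ m - k - 1 := by omega
          have hqz : m - k - 1 - t.length ≤ z := by omega
          have htake : (x :: (t ++ List.replicate z 0)).tail.take (m - k - 1)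
              = t ++ List.replicate (m - k - 1 - t.length) 0 := by
            simp only [List.tail_cons, List.take_append, List.take_replicate]
            rw [List.take_of_length_le hqt]
            congr 2
            omega
          have hdropz : (x :: (t ++ List.replicate z 0)).drop (m - k - 1)
              = (x :: t).drop (m - k - 1) ++ List.replicate (z - (m - k - 1 - (t.length + 1))) 0 := by
            rw [show x :: (t ++ List.replicate z 0) = (x :: t) ++ List.replicate z 0 by simp,
                List.drop_append, List.drop_replicate]
            congr 2
          rw [htake, hdropz]
          -- setting index m zeroes the head of the drop-part
          have hsetm : ((d ++ [2 * x]) ++ (t ++ List.replicate (m - k - 1 - t.length) 0)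
                ++ ((x :: t).drop (m - k - 1) ++ List.replicate (z - (m - k - 1 - (t.length + 1))) 0)).set m 0
              = (d ++ [2 * x]) ++ (t ++ List.replicate (z + 1) 0) := by
            rw [set_at_append _ _ m (by
              simp only [List.length_append, List.length_cons, List.length_nil,
                List.length_replicate, hk]
              omega)]
            rcases Nat.lt_or_ge (m - k - 1) (t.length + 1) with hlt | hge
            · -- m - k - 1 = t.length : the drop-part still starts with the old last tile
              have heq : m - k - 1 = t.length := by omega
              have hlast : ((x :: t).drop (m - k - 1)).length = 1 := by
                simp only [List.length_drop, List.length_cons]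
                omega
              obtain ⟨e, he⟩ := List.length_eq_one_iff.mp hlast
              rw [he, show z - (m - k - 1 - (t.length + 1)) = z by omega,
                  show m - k - 1 - t.length = 0 by omega]
              simp only [List.cons_append, List.set_cons_zero, List.replicate_zero,
                List.append_nil, List.append_assoc, List.nil_append]
              rw [← List.replicate_succ]
            · -- the whole drop-part is zeros already
              have hnil : (x :: t).drop (m - k - 1) = [] :=
                List.drop_eq_nil_of_le (by simp only [List.length_cons]; omega)
              rw [hnil]
              simp only [List.nil_append]
              rw [set_zero_replicate]
              simp only [List.append_assoc, List.replicate_append_replicate]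
              rw [show m - k - 1 - t.length + (z - (m - k - 1 - (t.length + 1))) = z + 1 by omega]
          rw [hsetm]
          have := ihn (k + 1) (d ++ [2 * x]) t (z + 1) (by omega) (by simp [hk])
            (fun a ha => hnz a (by simp at ha ⊢; tauto))
            (by omega) (by intro _; omega) (by omega)
          rw [this]
          have hmlen := length_pvMergeTiles t
          simp only [pvMergeTiles, if_true, List.length_cons]
          rw [show z + (t.length + 1 + 1) - ((pvMergeTiles t).length + 1)
                = z + 1 + t.length - (pvMergeTiles t).length by omega]
          simp

-- ===== VERDICT (by name: the statement is the Claim_ definition above) =====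
lemma colapse_row_eq (row : List Int) : colapse_row row = colapse_row_alt row := by
  cases row with
  | nil => simp [colapse_row, colapse_row_alt, pvPhase1, pvPhase2, pvPhase3, pvMergeTiles]
  | cons a row' =>
    simp only [colapse_row, colapse_row_alt]
    obtain ⟨h1, h2, h3⟩ := pvPhase1_spec (a :: row') 0 0 (le_refl 0)
    simp only [List.drop_zero, List.take_zero, List.nil_append, Nat.zero_add] at h1 h3
    have hfj : ((a :: row').filter (fun x => x != 0)).length ≤ (a :: row').length :=
      List.length_filter_le _ _
    have hn1 : 1 ≤ (a :: row').length := by simp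
    rw [pvPhase2_spec _ _ _ h2.symm, h1]
    rw [h1] at h3
    rw [h3]
    have hnz : ∀ x ∈ (a :: row').filter (fun x => x != 0), x ≠ 0 := by
      intro x hx
      have := List.of_mem_filter hx
      simpa using this
    have hmerge := pvPhase3_spec (min ((a :: row').filter (fun x => x != 0)).length
        ((a :: row').length - 1)) (min ((a :: row').filter (fun x => x != 0)).length
        ((a :: row').length - 1)) 0 []
      ((a :: row').filter (fun x => x != 0)) ((a :: row').length
        - ((a :: row').filter (fun x => x != 0)).length)
      (by omega) (by simp) hnz
      (by simp only [List.length_cons] at hfj ⊢; omega)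
      (by intro hz; simp only [List.length_cons] at hz hfj ⊢; omega)
      (by simp only [List.length_cons] at hfj ⊢; omega)
    simp only [List.nil_append] at hmerge
    rw [hmerge]
    have hml := length_pvMergeTiles ((a :: row').filter (fun x => x != 0))
    congr 1
    congr 1
    omega

theorem colapse_row_spec : Claim_equal_colapse_row := by
  intro row _
  exact colapse_row_eq row
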